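-- pv_equiv track=rewrite | github.com/TheShellLand/automon-core | automon/helpers/sanitation.py | safe_string
-- ===== SOURCE A (Python) =====
-- from string import (ascii_letters, digits)
--
-- def safe_string(text):
--     allowed_characters = ascii_letters + digits + '-_.'
--
--     text = str(text)
--     new_text = []
--
--     for character in text:
--         if character in allowed_characters:
--             new_text.append(character)
--         else:
--             new_text.append('_')
--
--     return ''.join(new_text)
-- ===== SOURCE B (Python) =====
-- import re
--
-- _DISALLOWED = re.compile(r'[^A-Za-z0-9_.-]')
--
-- def safe_string(text):
--     return _DISALLOWED.sub('_', str(text))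
-- ===== Notes on version B (the rewrite author's own statement) =====
-- stated objective: idiomatic
-- what changed: Replaces the per-character loop with a membership scan of a 65-char allowed string and list accumulation by a single precompiled regex substitution over the negated character class [^A-Za-z0-9_.-].
import Mathlib
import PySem

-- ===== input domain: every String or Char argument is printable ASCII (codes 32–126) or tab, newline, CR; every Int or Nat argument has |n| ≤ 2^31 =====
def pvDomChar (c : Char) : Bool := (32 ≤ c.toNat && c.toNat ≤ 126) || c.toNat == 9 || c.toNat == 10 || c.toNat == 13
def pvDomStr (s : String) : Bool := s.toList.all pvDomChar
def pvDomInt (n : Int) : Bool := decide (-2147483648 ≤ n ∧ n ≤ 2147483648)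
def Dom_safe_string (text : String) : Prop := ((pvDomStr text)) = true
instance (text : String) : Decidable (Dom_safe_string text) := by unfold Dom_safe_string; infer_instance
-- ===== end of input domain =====

-- B replaces A's per-character loop over an allowed-characters string by one regex
-- substitution with the negated character class [^A-Za-z0-9_.-] (idiomatic; same result).

-- ===== PORT A =====
-- allowed_characters = ascii_letters + digits + '-_.'
def pvAllowedChars : List Char :=
  "abcdefghijklmnopqrstuvwxyzABCDEFGHIJKLMNOPQRSTUVWXYZ0123456789-_.".toList

-- loop: for character in text: append character if allowed else '_'; ''.join
def safe_string (text : String) : String :=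
  String.mk (text.toList.foldl
    (fun acc c => acc ++ [if pvAllowedChars.contains c then c else '_']) [])

-- ===== PORT B =====
-- the character class [^A-Za-z0-9_.-]: a char is kept iff it matches none of the
-- listed ranges/literals; re.sub replaces each non-matching char by '_'
def pvClassMatch (c : Char) : Bool :=
  let n := c.toNat
  (65 ≤ n && n ≤ 90) || (97 ≤ n && n ≤ 122) || (48 ≤ n && n ≤ 57) ||
    n == 95 || n == 46 || n == 45

def safe_string_alt (text : String) : String :=
  String.mk (text.toList.map (fun c => if pvClassMatch c then c else '_'))

-- ===== PRECONDITION & SPEC =====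
def Spec_safe_string (text : String) (out : String) : Prop := out = safe_string_alt text
instance (text : String) (out : String) : Decidable (Spec_safe_string text out) := by unfold Spec_safe_string; infer_instance

-- ===== CLAIM (what is proved, stated in full; the proofs are below) =====
def Claim_equal_safe_string : Prop := ∀ (text : String), Dom_safe_string text → Spec_safe_string text (safe_string text)

-- ===== LEMMAS AND PROOFS =====
-- per-character agreement of the two tests, on every character the domain admits
set_option maxRecDepth 4096 in
theorem pv_char_agree : ∀ n : Fin 128,
    pvAllowedChars.contains (Char.ofNat n.val) = pvClassMatch (Char.ofNat n.val) := by
  decide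

theorem pv_char_agree' (c : Char) (h : pvDomChar c = true) :
    pvAllowedChars.contains c = pvClassMatch c := by
  have hlt : c.toNat < 128 := by
    simp only [pvDomChar, Bool.or_eq_true, Bool.and_eq_true, decide_eq_true_eq,
      beq_iff_eq] at h
    omega
  have := pv_char_agree ⟨c.toNat, hlt⟩
  simpa [Char.ofNat_toNat] using this

-- ===== VERDICT (by name: the statement is the Claim_ definition above) =====
theorem safe_string_spec : Claim_equal_safe_string := by
  intro text hdom
  unfold Spec_safe_string safe_string safe_string_alt
  rw [PySem.List.foldl_append_singleton_eq_map]
  have hall : ∀ c ∈ text.toList, pvDomChar c = true := by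
    simpa [Dom_safe_string, pvDomStr, List.all_eq_true] using hdom
  congr 1
  exact List.map_congr_left fun c hc => by rw [pv_char_agree' c (hall c hc)]
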